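-- pv_equiv track=rewrite | github.com/mnakhyar/pasal | scripts/parser/map_pdf_pages.py | compute_page_ranges
-- ===== SOURCE A (Python) =====
-- def compute_page_ranges(pasal_pages: dict[str, int], total_pages: int) -> dict[str, tuple[int, int]]:
--     """Compute (pdf_page_start, pdf_page_end) for each pasal."""
--     if not pasal_pages:
--         return {}
--
--     # Sort pasals by their first page appearance
--     sorted_pasals = sorted(pasal_pages.items(), key=lambda x: x[1])
--     ranges: dict[str, tuple[int, int]] = {}
--
--     for i, (pasal_num, start_page) in enumerate(sorted_pasals):
--         if i + 1 < len(sorted_pasals):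
--             next_start = sorted_pasals[i + 1][1]
--             # End page is the page before the next pasal starts,
--             # but at minimum the same as start_page
--             end_page = max(start_page, next_start - 1) if next_start > start_page else start_page
--         else:
--             end_page = total_pages
--         ranges[pasal_num] = (start_page, end_page)
--
--     return ranges
-- ===== SOURCE B (Python) =====
-- def compute_page_ranges(pasal_pages: dict[str, int], total_pages: int) -> dict[str, tuple[int, int]]:
--     """Compute (pdf_page_start, pdf_page_end) for each pasal.
--
--     Bucket the pasals by start page, then walk the sorted DISTINCT starts:
--     within a bucket every pasal except the last spans a single page, and the
--     bucket's last pasal runs up to the page before the next distinct start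
--     (or to total_pages for the final bucket)."""
--     buckets: dict[int, list[str]] = {}
--     for pasal, start in pasal_pages.items():
--         buckets.setdefault(start, []).append(pasal)
--     starts = sorted(buckets)
--     ranges: dict[str, tuple[int, int]] = {}
--     for s, nxt in zip(starts, starts[1:] + [None]):
--         names = buckets[s]
--         end = total_pages if nxt is None else nxt - 1
--         for name in names[:-1]:
--             ranges[name] = (s, s)
--         ranges[names[-1]] = (s, end)
--     return ranges
-- ===== Notes on version B (the rewrite author's own statement) =====
-- stated objective: alternative
-- what changed: Instead of sorting all items and looking ahead at index i+1, B buckets the pasals per start page in one dict pass, sorts only the distinct start pages, and emits each bucket's ranges (single-page entries for all but the bucket's last pasal, which runs to the next distinct start minus one, or total_pages for the final bucket).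
import Mathlib
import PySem

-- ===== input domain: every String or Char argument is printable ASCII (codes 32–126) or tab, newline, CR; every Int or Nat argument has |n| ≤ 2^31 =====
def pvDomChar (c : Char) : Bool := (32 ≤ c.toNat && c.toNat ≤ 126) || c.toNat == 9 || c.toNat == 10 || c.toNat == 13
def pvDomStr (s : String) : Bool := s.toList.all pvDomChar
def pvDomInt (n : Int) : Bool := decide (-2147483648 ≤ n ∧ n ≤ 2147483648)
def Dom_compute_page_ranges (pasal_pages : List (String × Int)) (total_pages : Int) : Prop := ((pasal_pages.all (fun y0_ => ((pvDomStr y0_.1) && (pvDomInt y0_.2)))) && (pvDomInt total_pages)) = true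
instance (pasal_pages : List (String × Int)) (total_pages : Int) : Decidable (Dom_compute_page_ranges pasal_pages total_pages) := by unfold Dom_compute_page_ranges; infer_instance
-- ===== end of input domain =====

-- B replaces A's sort-all-items-with-lookahead loop by bucketing the pasals per start page
-- and walking only the sorted DISTINCT start pages (objective: alternative algorithm; same output).

-- ===== PORT A =====
-- Python dict parameter → association list; `pasal_pages.items()` is `(Dict.ofList …).items`.
def compute_page_ranges (pasal_pages : List (String × Int)) (total_pages : Int) : List (String × Int × Int) :=
  let items := (PySem.Dict.ofList pasal_pages).items
  if items = [] then []
  else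
    let sorted_pasals := PySem.List.sorted items (fun x => x.2) false
    let ranges := (PySem.List.enumerate sorted_pasals).foldl
      (fun (r : PySem.Dict String (Int × Int)) ip =>
        r.insert ip.2.1 (ip.2.2,
          if ip.1 + 1 < (sorted_pasals.length : Int) then
            -- index ip.1 + 1 is in range here, so pyGetD's default is never used
            let next_start := (PySem.List.pyGetD sorted_pasals (ip.1 + 1) ("", 0)).2
            if next_start > ip.2.2 then max ip.2.2 (next_start - 1) else ip.2.2
          else total_pages))
      PySem.Dict.empty
    ranges.items

-- ===== PORT B =====
-- Source B: bucket pasals by start page (dict of lists), then loop over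
-- zip(starts, starts[1:] + [None]) emitting each bucket's ranges.
def compute_page_ranges_alt (pasal_pages : List (String × Int)) (total_pages : Int) : List (String × Int × Int) :=
  let items := (PySem.Dict.ofList pasal_pages).items
  let buckets := items.foldl
    (fun (b : PySem.Dict Int (List String)) p => b.modify p.2 [] (fun v => v ++ [p.1]))
    PySem.Dict.empty
  let starts := PySem.List.sorted buckets.keys (fun x => x) false
  let ranges := (List.zip starts ((PySem.List.slice starts (some 1) none).map Option.some ++ [none])).foldl
    (fun (r : PySem.Dict String (Int × Int)) sn =>
      let names := buckets.getD sn.1 []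
      let e : Int := match sn.2 with | none => total_pages | some n => n - 1
      let r' := (PySem.List.slice names none (some (-1))).foldl
        (fun r name => r.insert name (sn.1, sn.1)) r
      -- names[-1]: the bucket is never empty, so pyGetD's default is never used
      r'.insert (PySem.List.pyGetD names (-1) "") (sn.1, e))
    PySem.Dict.empty
  ranges.items

-- ===== PRECONDITION & SPEC =====
def Spec_compute_page_ranges (pasal_pages : List (String × Int)) (total_pages : Int) (out : List (String × Int × Int)) : Prop := out = compute_page_ranges_alt pasal_pages total_pages
instance (pasal_pages : List (String × Int)) (total_pages : Int) (out : List (String × Int × Int)) : Decidable (Spec_compute_page_ranges pasal_pages total_pages out) := by unfold Spec_compute_page_ranges; infer_instance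

-- ===== CLAIM (what is proved, stated in full; the proofs are below) =====
def Claim_equal_compute_page_ranges : Prop := ∀ (pasal_pages : List (String × Int)) (total_pages : Int), Dom_compute_page_ranges pasal_pages total_pages → Spec_compute_page_ranges pasal_pages total_pages (compute_page_ranges pasal_pages total_pages)

-- ===== LEMMAS AND PROOFS =====

-- Common reference shape of both programs' output on the stably sorted item list.
def pvCore (tp : Int) : List (String × Int) → List (String × Int × Int)
  | [] => []
  | [p] => [(p.1, p.2, tp)]
  | p :: q :: rest => (p.1, p.2, max p.2 (q.2 - 1)) :: pvCore tp (q :: rest)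

-- Output of one of B's buckets (names at start s, end page e for the bucket's last pasal).
def pvBucket (s e : Int) : List String → List (String × Int × Int)
  | [] => []
  | [n] => [(n, s, e)]
  | n :: m :: r => (n, s, s) :: pvBucket s e (m :: r)

theorem pvCore_map_fst (tp : Int) (l : List (String × Int)) :
    (pvCore tp l).map (·.1) = l.map (·.1) := by
  induction l with
  | nil => rfl
  | cons p l ih =>
    cases l with
    | nil => rfl
    | cons q rest => simpa [pvCore] using ih

theorem map_snd_fst_enumerate {α β : Type} (xs : List (α × β)) (s : Int) :
    (PySem.List.enumerate xs s).map (fun ip => ip.2.1) = xs.map (fun x => x.1) := by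
  induction xs generalizing s with
  | nil => simp [PySem.List.enumerate_nil]
  | cons x xs ih => simp [PySem.List.enumerate_cons, ih]

-- A's enumerate/foldl body, read off as a map, is pvCore on each suffix.
theorem pvA_map (tp : Int) (full : List (String × Int)) :
    ∀ (l pre : List (String × Int)), full = pre ++ l →
    (PySem.List.enumerate l (pre.length : Int)).map
      (fun ip => ((ip.2.1 : String), ((ip.2.2 : Int),
        if ip.1 + 1 < (full.length : Int) then
          let next_start := (PySem.List.pyGetD full (ip.1 + 1) ("", 0)).2
          if next_start > ip.2.2 then max ip.2.2 (next_start - 1) else ip.2.2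
        else tp)))
    = pvCore tp l := by
  intro l
  induction l with
  | nil => intro pre _; simp [pvCore]
  | cons p l ih =>
    intro pre hfull
    rw [PySem.List.enumerate_cons, List.map_cons]
    have htail := ih (pre ++ [p]) (by simp [hfull])
    have hone : (((pre ++ [p]).length : Nat) : Int) = (pre.length : Int) + 1 := by
      push_cast [List.length_append]; simp
    rw [hone] at htail
    rw [htail]
    cases l with
    | nil =>
      have hlen : ¬ ((pre.length : Int) + 1 < (full.length : Int)) := by
        subst hfull; simp
      simp [pvCore, hlen]
    | cons q rest =>
      have hlen : (pre.length : Int) + 1 < (full.length : Int) := by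
        subst hfull; push_cast [List.length_append, List.length_cons]; omega
      have hidx : PySem.List.pyGetD full ((pre.length : Int) + 1) ("", 0) = q := by
        rw [PySem.List.pyGetD_eq_getElem full ("", 0) (by positivity) hlen]
        subst hfull
        have : ((pre.length : Int) + 1).toNat = pre.length + 1 := by omega
        simp [this]
      have hmax : (if q.2 > p.2 then max p.2 (q.2 - 1) else p.2) = max p.2 (q.2 - 1) := by
        split <;> omega
      simp only [pvCore, hlen, if_pos, hidx]
      simp [hmax]

-- A equals pvCore applied to the stably sorted items.
theorem pvA_eq_core (pp : List (String × Int)) (tp : Int) :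
    compute_page_ranges pp tp
    = pvCore tp (PySem.List.sorted ((PySem.Dict.ofList pp).items) (fun x => x.2) false) := by
  have hnodup : (((PySem.Dict.ofList pp).items).map (·.1)).Nodup := PySem.Dict.nodup_keys_ofList pp
  have hperm := PySem.List.sorted_perm ((PySem.Dict.ofList pp).items) (fun x => x.2) false
  simp only [compute_page_ranges]
  generalize hS : PySem.List.sorted ((PySem.Dict.ofList pp).items) (fun x => x.2) false = sp at hperm ⊢
  generalize hI : (PySem.Dict.ofList pp).items = its at hperm hnodup ⊢
  have hspnodup : (sp.map (·.1)).Nodup := ((hperm.map (·.1)).nodup_iff).mpr hnodup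
  by_cases hits : its = []
  · subst hits
    have : sp = [] := hperm.eq_nil
    subst this
    simp [pvCore]
  · rw [if_neg hits]
    have henum : ((PySem.List.enumerate sp).map (fun ip => ip.2.1)).Nodup := by
      rw [map_snd_fst_enumerate]; exact hspnodup
    have hfresh := PySem.Dict.items_foldl_insert_fresh (PySem.List.enumerate sp)
      (fun ip => ip.2.1)
      (fun ip => ((ip.2.2 : Int),
        if ip.1 + 1 < ((sp : List (String × Int)).length : Int) then
          let next_start := (PySem.List.pyGetD sp (ip.1 + 1) ("", 0)).2
          if next_start > ip.2.2 then max ip.2.2 (next_start - 1) else ip.2.2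
        else tp))
      PySem.Dict.empty (by intro a _; simp [PySem.Dict.contains_empty]) henum
    rw [show (PySem.Dict.empty : PySem.Dict String (Int × Int)).items = [] from rfl,
      List.nil_append] at hfresh
    rw [hfresh]
    beta_reduce
    have hA := pvA_map tp sp sp [] (by simp)
    rw [show ((([] : List (String × Int)).length : Nat) : Int) = 0 from rfl] at hA
    rw [hA]

-- insertBy skips a prefix it is not inserted before.
theorem pv_insertBy_append {α : Type} (before : α → α → Bool) (x : α) (u v : List α)
    (h : ∀ y ∈ u, before x y = false) :
    PySem.List.insertBy before x (u ++ v) = u ++ PySem.List.insertBy before x v := by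
  induction u with
  | nil => simp
  | cons y u ih =>
    have hy : before x y = false := h y (by simp)
    simp only [List.cons_append, PySem.List.insertBy, hy]
    simp [ih (fun z hz => h z (by simp [hz]))]

-- insertBy prepends when it goes before everything.
theorem pv_insertBy_front {α : Type} (before : α → α → Bool) (x : α) (v : List α)
    (h : ∀ y ∈ v, before x y = true) :
    PySem.List.insertBy before x v = x :: v := by
  cases v with
  | nil => simp [PySem.List.insertBy]
  | cons y ys => simp [PySem.List.insertBy, h y (by simp)]

-- Inserting an item whose key is already a bucket key appends it to its bucket.
theorem pv_insertBy_flatMap_mem (ds : List Int) (f : Int → List (String × Int)) (x : String × Int)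
    (hp : ds.Pairwise (· < ·)) (hf : ∀ s, ∀ p ∈ f s, p.2 = s) (ht : x.2 ∈ ds) :
    PySem.List.insertBy (fun a b => decide (a.2 < b.2)) x (ds.flatMap f)
    = ds.flatMap (fun s => f s ++ if x.2 == s then [x] else []) := by
  induction ds with
  | nil => simp at ht
  | cons s rest ih =>
    have hlt : ∀ t ∈ rest, s < t := by
      intro t htm; exact (List.pairwise_cons.mp hp).1 t htm
    by_cases hx : x.2 = s
    · have hnr : x.2 ∉ rest := by
        intro hmem; have := hlt _ hmem; omega
      have hskip : ∀ y ∈ f s, (fun a b => decide (a.2 < b.2)) x y = false := by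
        intro y hy; simp [hf s y hy, hx]
      have hfront : ∀ y ∈ rest.flatMap f, (fun a b => decide (a.2 < b.2)) x y = true := by
        intro y hy
        obtain ⟨t, htm, hyt⟩ := List.mem_flatMap.mp hy
        simp [hf t y hyt, hx]; exact hlt t htm
      rw [List.flatMap_cons, pv_insertBy_append _ _ _ _ hskip, pv_insertBy_front _ _ _ hfront]
      rw [List.flatMap_cons]
      have : rest.flatMap (fun t => f t ++ if x.2 == t then [x] else []) = rest.flatMap f := by
        apply List.flatMap_congr  -- may not exist; check
        intro t htm
        have : x.2 ≠ t := by intro h; exact hnr (h ▸ htm)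
        simp [this]
      rw [this]
      simp [hx]
    · have hxr : x.2 ∈ rest := by
        rcases List.mem_cons.mp ht with h | h
        · exact absurd h hx
        · exact h
      have hslt : s < x.2 := hlt _ hxr
      have hskip : ∀ y ∈ f s, (fun a b => decide (a.2 < b.2)) x y = false := by
        intro y hy; simp [hf s y hy]; omega
      rw [List.flatMap_cons, pv_insertBy_append _ _ _ _ hskip,
        ih (List.pairwise_cons.mp hp).2 hxr, List.flatMap_cons]
      have : (x.2 == s) = false := by simp [hx]
      simp [this]

-- Inserting an item with a fresh key creates its bucket where the key sorts.
theorem pv_insertBy_flatMap_not_mem (ds : List Int) (f : Int → List (String × Int)) (x : String × Int)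
    (hp : ds.Pairwise (· < ·)) (hf : ∀ s, ∀ p ∈ f s, p.2 = s) (ht : x.2 ∉ ds)
    (hft : f x.2 = []) :
    PySem.List.insertBy (fun a b => decide (a.2 < b.2)) x (ds.flatMap f)
    = (PySem.List.insertBy (fun a b => decide (a < b)) x.2 ds).flatMap
        (fun s => f s ++ if x.2 == s then [x] else []) := by
  induction ds with
  | nil => simp [PySem.List.insertBy, hft]
  | cons s rest ih =>
    have hlt : ∀ t ∈ rest, s < t := by
      intro t htm; exact (List.pairwise_cons.mp hp).1 t htm
    have hxs : x.2 ≠ s := fun h => ht (by simp [h])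
    by_cases hc : x.2 < s
    · have hfront : ∀ y ∈ (s :: rest).flatMap f, (fun a b => decide (a.2 < b.2)) x y = true := by
        intro y hy
        obtain ⟨t, htm, hyt⟩ := List.mem_flatMap.mp hy
        rcases List.mem_cons.mp htm with h | h
        · simp [hf t y hyt, h]; omega
        · simp [hf t y hyt]; have := hlt _ h; omega
      have hins : PySem.List.insertBy (fun a b => decide (a < b)) x.2 (s :: rest)
          = x.2 :: s :: rest := by simp [PySem.List.insertBy, hc]
      have hcongr : (s :: rest).flatMap (fun t => f t ++ if x.2 == t then [x] else [])
          = (s :: rest).flatMap f := by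
        apply List.flatMap_congr
        intro t htm
        have : x.2 ≠ t := fun h => ht (h ▸ htm)
        simp [this]
      have hrhs : (x.2 :: s :: rest).flatMap (fun t => f t ++ if x.2 == t then [x] else [])
          = x :: (s :: rest).flatMap f := by
        rw [List.flatMap_cons, hcongr]
        simp [hft]
      rw [pv_insertBy_front _ _ _ hfront, hins, hrhs]
    · have hslt : s < x.2 := by omega
      have hskip : ∀ y ∈ f s, (fun a b => decide (a.2 < b.2)) x y = false := by
        intro y hy; simp [hf s y hy]; omega
      have hins : PySem.List.insertBy (fun a b => decide (a < b)) x.2 (s :: rest)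
          = s :: PySem.List.insertBy (fun a b => decide (a < b)) x.2 rest := by
        simp [PySem.List.insertBy]; omega
      rw [List.flatMap_cons, pv_insertBy_append _ _ _ _ hskip,
        ih (List.pairwise_cons.mp hp).2 (fun h => ht (by simp [h])), hins, List.flatMap_cons]
      have : (x.2 == s) = false := by simp [hxs]
      simp [this]

-- STABILITY: Python's stable sort by start equals the concatenation, over the sorted
-- distinct starts, of the same-start items in their original order.
theorem pv_sortflat (l : List (String × Int)) :
    PySem.List.sorted l (fun p => p.2) false
    = (PySem.List.sorted (PySem.Set.ofList (l.map (fun p => p.2))) (fun x => x) false).flatMap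
        (fun s => l.filter (fun p => p.2 == s)) := by
  induction l using List.reverseRecOn with
  | nil => simp [PySem.List.sorted_eq_foldl_insertBy]
  | append_singleton l x ih =>
    have hsorted : PySem.List.sorted (l ++ [x]) (fun p => p.2) false
        = PySem.List.insertBy (fun a b => decide (a.2 < b.2)) x
            (PySem.List.sorted l (fun p => p.2) false) := by
      rw [PySem.List.sorted_eq_foldl_insertBy, PySem.List.sorted_eq_foldl_insertBy,
        List.foldl_append]
      simp
    have hp : (PySem.List.sorted (PySem.Set.ofList (l.map (fun p => p.2))) (fun x => x) false).Pairwise (· < ·) :=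
      PySem.List.sorted_ofList_pairwise_lt _
    have hf : ∀ s, ∀ p ∈ l.filter (fun p => p.2 == s), p.2 = s := by
      intro s p hpmem
      simpa using List.of_mem_filter hpmem
    have hfilterapp : ∀ s : Int, (l ++ [x]).filter (fun p => p.2 == s)
        = l.filter (fun p => p.2 == s) ++ (if x.2 == s then [x] else []) := by
      intro s
      rw [List.filter_append]
      congr 1
      by_cases h : x.2 = s <;> simp [h]
    by_cases hmem : x.2 ∈ l.map (fun p => p.2)
    · have hds' : PySem.Set.ofList ((l ++ [x]).map (fun p => p.2))
          = PySem.Set.ofList (l.map (fun p => p.2)) := by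
        rw [List.map_append]
        simp only [List.map_cons, List.map_nil]
        rw [PySem.Set.ofList_append_singleton]
        exact PySem.Set.add_of_mem (by rw [PySem.Set.mem_ofList]; exact hmem)
      have hin : x.2 ∈ PySem.List.sorted (PySem.Set.ofList (l.map (fun p => p.2))) (fun x => x) false := by
        rw [PySem.List.mem_sorted, PySem.Set.mem_ofList]; exact hmem
      rw [hsorted, ih, pv_insertBy_flatMap_mem _ _ x hp hf hin, hds']
      apply List.flatMap_congr
      intro s _
      exact (hfilterapp s).symm
    · have hft : l.filter (fun p => p.2 == x.2) = [] := by
        rw [List.filter_eq_nil_iff]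
        intro p hpl hbeq
        exact hmem (List.mem_map.mpr ⟨p, hpl, by simpa using hbeq⟩)
      have hnin : x.2 ∉ PySem.List.sorted (PySem.Set.ofList (l.map (fun p => p.2))) (fun x => x) false := by
        rw [PySem.List.mem_sorted, PySem.Set.mem_ofList]; exact hmem
      have hds' : PySem.List.sorted (PySem.Set.ofList ((l ++ [x]).map (fun p => p.2))) (fun x => x) false
          = PySem.List.insertBy (fun a b => decide (a < b)) x.2
              (PySem.List.sorted (PySem.Set.ofList (l.map (fun p => p.2))) (fun x => x) false) := by
        rw [List.map_append]
        simp only [List.map_cons, List.map_nil]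
        rw [PySem.Set.ofList_append_singleton,
          PySem.Set.add_of_not_mem (by rw [PySem.Set.mem_ofList]; exact hmem)]
        rw [PySem.List.sorted_eq_foldl_insertBy, PySem.List.sorted_eq_foldl_insertBy,
          List.foldl_append]
        simp
      rw [hsorted, ih, pv_insertBy_flatMap_not_mem _ _ x hp hf hnin hft, hds']
      apply List.flatMap_congr
      intro s _
      exact (hfilterapp s).symm

-- xs[-1] with a default is getLastD.
theorem pv_pyGetD_neg_one {α : Type} (xs : List α) (d : α) :
    PySem.List.pyGetD xs (-1) d = xs.getLastD d := by
  cases xs with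
  | nil => rfl
  | cons y ys =>
    simp only [PySem.List.pyGetD, PySem.List.pyGet?, PySem.List.pyIdx?]
    have h1 : ¬ (0:Int) ≤ -1 := by omega
    have h2 : -(((y::ys).length : Nat) : Int) ≤ -1 := by
      simp only [List.length_cons]; omega
    rw [if_neg h1, if_pos h2]
    have h3 : (y::ys).length - ((-(-1:Int)).toNat) = ys.length := by simp
    rw [h3]
    simp only [Option.bind_some]
    rw [List.getLastD_eq_getLast?, List.getLast?_eq_getElem?]
    simp

-- B's per-bucket entry list is pvBucket.
theorem pv_bucket_list (s e : Int) (ns : List String) (h : ns ≠ []) :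
    ns.dropLast.map (fun n => ((n : String), ((s : Int), (s : Int))))
      ++ [(PySem.List.pyGetD ns (-1) "", (s, e))] = pvBucket s e ns := by
  induction ns with
  | nil => exact absurd rfl h
  | cons n ns ih =>
    cases ns with
    | nil => simp [pvBucket, pv_pyGetD_neg_one]
    | cons m r =>
      have htail := ih (by simp)
      rw [pv_pyGetD_neg_one] at htail ⊢
      simp only [List.dropLast_cons₂, List.map_cons, List.cons_append, pvBucket]
      rw [show (n::m::r).getLastD "" = (m::r).getLastD "" from by
        simp, htail]

-- pvCore of a single constant-start block ending the list.
theorem pv_core_const (tp s : Int) (u : List (String × Int)) (hu : u ≠ [])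
    (hk : ∀ p ∈ u, p.2 = s) : pvCore tp u = pvBucket s tp (u.map (fun p => p.1)) := by
  induction u with
  | nil => exact absurd rfl hu
  | cons p u ih =>
    cases u with
    | nil => simp [pvCore, pvBucket, hk p (by simp)]
    | cons q r =>
      have hp2 : p.2 = s := hk p (by simp)
      have hq2 : q.2 = s := hk q (by simp)
      have : max p.2 (q.2 - 1) = s := by rw [hp2, hq2]; omega
      have htail := ih (by simp) (fun x hx => hk x (by simp [List.mem_cons] at hx ⊢; tauto))
      show (p.1, p.2, max p.2 (q.2 - 1)) :: pvCore tp (q :: r) = _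
      rw [this, hp2, htail, List.map_cons]
      simp [pvBucket]

-- pvCore splits off a leading constant-start block before a strictly larger start.
theorem pv_core_append (tp s s' : Int) (u v : List (String × Int)) (hu : u ≠ [])
    (hk : ∀ p ∈ u, p.2 = s) (hlt : s < s')
    (hv : ∃ q v', v = q :: v' ∧ q.2 = s') :
    pvCore tp (u ++ v) = pvBucket s (s' - 1) (u.map (fun p => p.1)) ++ pvCore tp v := by
  induction u with
  | nil => exact absurd rfl hu
  | cons p u ih =>
    obtain ⟨q, v', hveq, hq2⟩ := hv
    cases u with
    | nil =>
      subst hveq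
      have hp2 : p.2 = s := hk p (by simp)
      have : max p.2 (q.2 - 1) = s' - 1 := by rw [hp2, hq2]; omega
      show (p.1, p.2, max p.2 (q.2 - 1)) :: pvCore tp (q :: v') = _
      rw [this, hp2]
      simp [pvBucket]
    | cons p2 u' =>
      have hp2 : p.2 = s := hk p (by simp)
      have hp22 : p2.2 = s := hk p2 (by simp)
      have : max p.2 (p2.2 - 1) = s := by rw [hp2, hp22]; omega
      have htail := ih (by simp) (fun x hx => hk x (by simp [List.mem_cons] at hx ⊢; tauto))
      show (p.1, p.2, max p.2 (p2.2 - 1)) :: pvCore tp ((p2 :: u') ++ v) = _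
      rw [this, hp2, htail, List.map_cons]
      simp [pvBucket]

-- B's zip-driven bucket walk flattens to pvCore of the bucket concatenation.
theorem pv_zip_core (tp : Int) (ds : List Int) (f : Int → List (String × Int))
    (hp : ds.Pairwise (· < ·)) (hne : ∀ s ∈ ds, f s ≠ []) (hk : ∀ s, ∀ p ∈ f s, p.2 = s) :
    (List.zip ds (ds.tail.map Option.some ++ [none])).flatMap
      (fun sn => pvBucket sn.1 (match sn.2 with | none => tp | some n => n - 1)
        ((f sn.1).map (fun p => p.1)))
    = pvCore tp (ds.flatMap f) := by
  induction ds with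
  | nil => simp [pvCore]
  | cons s rest ih =>
    cases rest with
    | nil =>
      simp only [List.tail_cons, List.map_nil, List.nil_append, List.zip_cons_cons,
        List.zip_nil_right, List.flatMap_cons, List.flatMap_nil, List.append_nil]
      rw [pv_core_const tp s (f s) (hne s (by simp)) (hk s)]
    | cons s' r' =>
      have hlt : s < s' := (List.pairwise_cons.mp hp).1 s' (by simp)
      obtain ⟨q, w, hfq⟩ : ∃ q w, f s' = q :: w := by
        cases hfs' : f s' with
        | nil => exact absurd hfs' (hne s' (by simp))
        | cons a b => exact ⟨a, b, rfl⟩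
      have hv : ∃ q v', f s' ++ r'.flatMap f = q :: v' ∧ q.2 = s' := by
        refine ⟨q, w ++ r'.flatMap f, ?_, hk s' q (by simp [hfq])⟩
        simp [hfq]
      simp only [List.tail_cons, List.map_cons, List.cons_append, List.zip_cons_cons,
        List.flatMap_cons]
      rw [pv_core_append tp s s' (f s) (f s' ++ r'.flatMap f) (hne s (by simp)) (hk s) hlt hv]
      have := ih (List.pairwise_cons.mp hp).2 (fun t htm => hne t (by simp [htm]))
      simp only [List.tail_cons, List.flatMap_cons] at this
      rw [← this]

-- A nested insert loop is the insert fold of the flattened pair list.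
theorem pv_dict_foldl_flat {γ : Type} (zl : List γ) (g : γ → List (String × (Int × Int)))
    (d : PySem.Dict String (Int × Int)) :
    zl.foldl (fun r sn => (g sn).foldl (fun r pr => r.insert pr.1 pr.2) r) d
    = (zl.flatMap g).foldl (fun r pr => r.insert pr.1 pr.2) d := by
  induction zl generalizing d with
  | nil => rfl
  | cons z zl ih => simp [List.foldl_append, ih]

-- B equals pvCore applied to the stably sorted items.
theorem pvB_eq_core (pp : List (String × Int)) (tp : Int) :
    compute_page_ranges_alt pp tp
    = pvCore tp (PySem.List.sorted ((PySem.Dict.ofList pp).items) (fun x => x.2) false) := by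
  simp only [compute_page_ranges_alt]
  set l := (PySem.Dict.ofList pp).items with hl
  set buckets := l.foldl
    (fun (b : PySem.Dict Int (List String)) p => b.modify p.2 [] (fun v => v ++ [p.1]))
    PySem.Dict.empty with hbk
  set f : Int → List (String × Int) := fun s => l.filter (fun p => p.2 == s) with hf
  -- the bucket dict: its keys are the distinct starts, its entries the per-start names
  have hkeys : buckets.keys = PySem.Set.ofList (l.map (fun p => p.2)) := by
    have := PySem.Dict.keys_foldl_modify_key l (fun p => p.2) ([] : List String)
      (fun d p v => v ++ [p.1]) PySem.Dict.empty
    simpa [PySem.Set.update_nil_left] using this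
  have hswap : buckets = (l.map Prod.swap).foldl
      (fun (b : PySem.Dict Int (List String)) q => b.modify q.1 [] (fun v => v ++ [q.2]))
      PySem.Dict.empty := by
    rw [hbk]
    exact (List.foldl_map (f := Prod.swap)
      (g := fun (b : PySem.Dict Int (List String)) q => b.modify q.1 [] fun v => v ++ [q.2])
      (l := l) (init := PySem.Dict.empty)).symm
  have hgetD : ∀ s : Int, buckets.getD s [] = (f s).map (fun p => p.1) := by
    intro s
    rw [hswap, PySem.Dict.getD_foldl_modify_append]
    simp only [PySem.Dict.getD_empty, List.nil_append, hf]
    rw [List.filter_map]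
    simp [Function.comp_def]
  set ds := PySem.List.sorted buckets.keys (fun x => x) false with hds
  have hdspair : ds.Pairwise (· < ·) := by
    rw [hds, hkeys]; exact PySem.List.sorted_ofList_pairwise_lt _
  have hkf : ∀ s, ∀ p ∈ f s, p.2 = s := by
    intro s p hpmem
    simpa using List.of_mem_filter hpmem
  have hne : ∀ s ∈ ds, f s ≠ [] := by
    intro s hs
    rw [hds, hkeys, PySem.List.mem_sorted, PySem.Set.mem_ofList] at hs
    obtain ⟨p, hpl, hps⟩ := List.mem_map.mp hs
    rw [hf, Ne, List.filter_eq_nil_iff]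
    intro h
    exact h p hpl (by simpa using hps)
  -- flatten B's nested insert loops into one insert fold over the emitted pairs
  set zl := List.zip ds ((PySem.List.slice ds (some 1) none).map Option.some ++ [none]) with hzl
  set g : Int × Option Int → List (String × (Int × Int)) := fun sn =>
    (buckets.getD sn.1 []).dropLast.map (fun n => (n, (sn.1, sn.1)))
      ++ [(PySem.List.pyGetD (buckets.getD sn.1 []) (-1) "", (sn.1,
            match sn.2 with | none => tp | some n => n - 1))] with hg
  have hbody : ∀ (r : PySem.Dict String (Int × Int)) (sn : Int × Option Int),
      (((PySem.List.slice (buckets.getD sn.1 []) none (some (-1))).foldl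
          (fun r name => r.insert name (sn.1, sn.1)) r).insert
        (PySem.List.pyGetD (buckets.getD sn.1 []) (-1) "")
        (sn.1, match sn.2 with | none => tp | some n => n - 1))
      = (g sn).foldl (fun r pr => r.insert pr.1 pr.2) r := by
    intro r sn
    simp only [hg, PySem.List.slice_to_neg_one, List.foldl_append, List.foldl_map]
    rfl
  refine Eq.trans (congrArg PySem.Dict.items
    (Eq.trans (PySem.List.foldl_congr_mem zl _ _ PySem.Dict.empty
        (fun acc sn _ => hbody acc sn))
      (pv_dict_foldl_flat zl g PySem.Dict.empty))) ?_
  -- identify the emitted pair list with pvCore of the sorted items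
  have hgbucket : ∀ sn ∈ zl, g sn
      = pvBucket sn.1 (match sn.2 with | none => tp | some n => n - 1)
          ((f sn.1).map (fun p => p.1)) := by
    intro sn hsn
    have hmem : sn.1 ∈ ds := by
      have := List.of_mem_zip hsn
      exact this.1
    have hnames : (f sn.1).map (fun p => p.1) ≠ [] := by
      simp [hne sn.1 hmem]
    rw [hg]
    simp only [hgetD]
    exact pv_bucket_list sn.1 _ _ hnames
  have hP : zl.flatMap g = pvCore tp (PySem.List.sorted l (fun x => x.2) false) := by
    rw [List.flatMap_congr hgbucket]
    have hzl' : zl = List.zip ds (ds.tail.map Option.some ++ [none]) := by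
      rw [hzl, PySem.List.slice_from_one]
    rw [hzl']
    exact Eq.trans (pv_zip_core tp ds f hdspair hne hkf)
      (by rw [hds, hkeys, ← pv_sortflat l])
  rw [hP]
  -- the inserted keys are the distinct pasal names, so the dict items read back the list
  have hnodup : ((pvCore tp (PySem.List.sorted l (fun x => x.2) false)).map (fun a => a.1)).Nodup := by
    rw [pvCore_map_fst]
    have hperm := PySem.List.sorted_perm l (fun x => x.2) false
    have hmk : (l.map (fun a => a.1)).Nodup := PySem.Dict.nodup_keys_ofList pp
    exact ((hperm.map (fun a => a.1)).nodup_iff).mpr hmk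
  have hfresh := PySem.Dict.items_foldl_insert_fresh
    (pvCore tp (PySem.List.sorted l (fun x => x.2) false))
    (fun a => a.1) (fun a => a.2) PySem.Dict.empty
    (by intro a _; simp [PySem.Dict.contains_empty]) hnodup
  rw [show (PySem.Dict.empty : PySem.Dict String (Int × Int)).items = [] from rfl,
    List.nil_append] at hfresh
  rw [hfresh]
  simp

theorem pv_main (pp : List (String × Int)) (tp : Int) :
    compute_page_ranges pp tp = compute_page_ranges_alt pp tp := by
  rw [pvA_eq_core, pvB_eq_core]

-- ===== VERDICT (by name: the statement is the Claim_ definition above) =====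
theorem compute_page_ranges_spec : Claim_equal_compute_page_ranges := by
  intro pp tp _
  exact pv_main pp tp
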